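-- pv_equiv track=rewrite | github.com/ZNGAS/APCS | 字串操作.py | switch0
-- ===== SOURCE A (Python) =====
-- def switch0(word):
--     word_list = list(word)
--     word_a = word_list[::2]
--     word_b = word_list[1::2]
--     pair = list(zip(word_a,word_b))
--     swapped_list = []
--     for a, b in pair:
--         swapped_list.append(b)
--         swapped_list.append(a)
--     swapped = "".join("".join(map(str,h)) for h in swapped_list)
--     return swapped
-- ===== SOURCE B (Python) =====
-- def switch0(word):
--     out = []
--     for i in range(0, len(word) - 1, 2):
--         out.append(word[i + 1])
--         out.append(word[i])
--     return "".join(out)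
-- ===== Notes on version B (the rewrite author's own statement) =====
-- stated objective: simpler
-- what changed: Replaced the even/odd slicing + zip + append-loop + nested-join pipeline with a single direct index loop over the pairs (for i in range(0, len(word)-1, 2)) that emits word[i+1], word[i], joined once; no intermediate half-lists, pairs list or per-character join generator are built.
import Mathlib
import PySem

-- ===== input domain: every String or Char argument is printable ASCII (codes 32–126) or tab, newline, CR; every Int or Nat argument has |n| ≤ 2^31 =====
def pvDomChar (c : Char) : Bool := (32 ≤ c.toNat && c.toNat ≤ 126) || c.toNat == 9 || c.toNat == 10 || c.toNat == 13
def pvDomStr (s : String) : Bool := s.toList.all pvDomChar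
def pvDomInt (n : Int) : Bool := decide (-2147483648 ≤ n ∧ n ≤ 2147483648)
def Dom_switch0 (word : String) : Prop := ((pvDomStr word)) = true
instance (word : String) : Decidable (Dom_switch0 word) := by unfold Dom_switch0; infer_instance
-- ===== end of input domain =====

-- B replaces A's even/odd slicing + zip + append-loop + nested-join pipeline with a single
-- direct index loop over the pairs (objective: simpler).

-- ===== PORT A =====
-- word_list[::2] / word_list[1::2] are the extended slices (step 2, always defined);
-- "".join(map(str,h)) on a single char h is just h, so the outer join is String.ofList.
def switch0 (word : String) : String :=
  let word_list := word.toList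
  let word_a := (PySem.List.slice? word_list none none 2).getD []
  let word_b := (PySem.List.slice? word_list (some 1) none 2).getD []
  let pair := word_a.zip word_b
  let swapped_list := pair.foldl (fun acc p => acc ++ [p.2, p.1]) []
  String.ofList swapped_list

-- ===== PORT B =====
-- out = []; for i in range(0, len(word)-1, 2): out.append(word[i+1]); out.append(word[i])
-- return "".join(out)   (indices i, i+1 are always in range, so pyGetD's default is never used)
def switch0_alt (word : String) : String :=
  let cs := word.toList
  String.ofList ((PySem.List.pyRange 0 ((cs.length : Int) - 1) 2).foldl
    (fun out i => out ++ [PySem.List.pyGetD cs (i + 1) ' ', PySem.List.pyGetD cs i ' ']) [])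

-- ===== PRECONDITION & SPEC =====
def Spec_switch0 (word : String) (out : String) : Prop := out = switch0_alt word
instance (word : String) (out : String) : Decidable (Spec_switch0 word out) := by unfold Spec_switch0; infer_instance

-- ===== CLAIM (what is proved, stated in full; the proofs are below) =====
def Claim_equal_switch0 : Prop := ∀ (word : String), Dom_switch0 word → Spec_switch0 word (switch0 word)

-- ===== LEMMAS AND PROOFS =====

-- common normal form: both ports produce the pairwise-swapped character list
def swapGo : List Char → List Char
  | a :: b :: t => b :: a :: swapGo t
  | _ => []

-- word_list[::2] = the characters at even positions
def evens : List Char → List Char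
  | [] => []
  | [a] => [a]
  | a :: _ :: t => a :: evens t

-- word_list[1::2] = the characters at odd positions
def odds : List Char → List Char
  | _ :: b :: t => b :: odds t
  | _ => []

lemma filterMap_evens (xs : List Char) :
    (List.range ((xs.length + 1) / 2)).filterMap (fun k => xs[2*k]?) = evens xs := by
  induction xs using evens.induct with
  | case1 => simp [evens]
  | case2 a => simp [evens]
  | case3 a b t ih =>
      have hlen : ((a :: b :: t).length + 1) / 2 = (t.length + 1) / 2 + 1 := by
        simp [List.length_cons]; omega
      rw [hlen, List.range_succ_eq_map, List.filterMap_cons, List.filterMap_map]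
      have : ∀ k : Nat, (a :: b :: t)[2 * Nat.succ k]? = t[2*k]? := by
        intro k
        have : 2 * Nat.succ k = 2*k + 1 + 1 := by omega
        simp [this]
      simp only [Function.comp_def, this]
      simp [evens, ih]

lemma filterMap_odds (xs : List Char) :
    (List.range (xs.length / 2)).filterMap (fun k => xs[2*k+1]?) = odds xs := by
  induction xs using odds.induct with
  | case1 a b t ih =>
      have hlen : (a :: b :: t).length / 2 = t.length / 2 + 1 := by
        simp [List.length_cons]; omega
      rw [hlen, List.range_succ_eq_map, List.filterMap_cons, List.filterMap_map]
      have : ∀ k : Nat, (a :: b :: t)[2 * Nat.succ k + 1]? = t[2*k+1]? := by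
        intro k
        have : 2 * Nat.succ k + 1 = 2*k + 1 + 1 + 1 := by omega
        simp [this]
      simp only [Function.comp_def, this]
      simp [odds, ih]
  | case2 x h =>
      cases x with
      | nil => simp [odds]
      | cons a t =>
        cases t with
        | nil => simp [odds]
        | cons b t' => exact absurd rfl (h a b t')

lemma slice2_evens (xs : List Char) :
    PySem.List.slice? xs none none 2 = some (evens xs) := by
  rw [← filterMap_evens]
  simp only [PySem.List.slice?, PySem.List.sliceIndices]
  norm_num
  have hc : (if 0 < xs.length then (((xs.length : Int) + 2 - 1) / 2).toNat else 0)
      = (xs.length + 1) / 2 := by split_ifs with h <;> omega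
  rw [hc]
  simp only [show ∀ x : Nat, ((2 * (x : Int)).toNat) = 2 * x from fun x => by omega]

lemma slice2_odds (xs : List Char) :
    PySem.List.slice? xs (some 1) none 2 = some (odds xs) := by
  rw [← filterMap_odds]
  simp only [PySem.List.slice?, PySem.List.sliceIndices]
  norm_num
  cases xs with
  | nil => simp
  | cons a t =>
      have hmin : min 1 ((a :: t).length : Int) = 1 := by
        have : (1 : Int) ≤ ((a :: t).length : Int) := by simp [List.length_cons]
        omega
      rw [hmin]
      have hc : (if 1 < (a :: t).length then ((((a :: t).length : Int) - 1 + 2 - 1) / 2).toNat else 0)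
          = (a :: t).length / 2 := by split_ifs with h <;> omega
      rw [hc]
      simp only [show ∀ x : Nat, ((1 + 2 * (x : Int)).toNat) = 2 * x + 1 from fun x => by omega]

-- A's loop over zip(evens, odds) builds exactly the swapped list
lemma zip_fold_swap (xs : List Char) (acc : List Char) :
    ((evens xs).zip (odds xs)).foldl (fun acc p => acc ++ [p.2, p.1]) acc
      = acc ++ swapGo xs := by
  induction xs using swapGo.induct generalizing acc with
  | case1 a b t ih =>
      simp only [evens, odds, swapGo, List.zip_cons_cons, List.foldl_cons]
      rw [ih]; simp
  | case2 x h =>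
      cases x with
      | nil => simp [evens, odds, swapGo]
      | cons a t =>
        cases t with
        | nil => simp [evens, odds, swapGo]
        | cons b t' => exact absurd rfl (h a b t')

-- B's index loop, restated over Nat indices, builds exactly the swapped list
lemma foldNat_swap (xs : List Char) (acc : List Char) :
    (List.range (xs.length / 2)).foldl
        (fun out k => out ++ [xs.getD (2*k+1) ' ', xs.getD (2*k) ' ']) acc
      = acc ++ swapGo xs := by
  induction xs using swapGo.induct generalizing acc with
  | case1 a b t ih =>
      have hlen : (a :: b :: t).length / 2 = t.length / 2 + 1 := by
        simp [List.length_cons]; omega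
      rw [hlen, List.range_succ_eq_map, List.foldl_cons, List.foldl_map]
      have h1 : ∀ k : Nat, (a :: b :: t).getD (2 * Nat.succ k + 1) ' ' = t.getD (2*k+1) ' ' := by
        intro k
        have : 2 * Nat.succ k + 1 = 2*k + 1 + 1 + 1 := by omega
        simp [this]
      have h2 : ∀ k : Nat, (a :: b :: t).getD (2 * Nat.succ k) ' ' = t.getD (2*k) ' ' := by
        intro k
        have : 2 * Nat.succ k = 2*k + 1 + 1 := by omega
        simp [this]
      simp only [h1, h2]
      rw [ih]
      simp [swapGo]
  | case2 x h =>
      cases x with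
      | nil => simp [swapGo]
      | cons a t =>
        cases t with
        | nil => simp [swapGo]
        | cons b t' => exact absurd rfl (h a b t')

-- bridge B's pyRange/pyGetD loop to the Nat-indexed loop
lemma pyfold_swap (xs : List Char) :
    (PySem.List.pyRange 0 ((xs.length : Int) - 1) 2).foldl
        (fun out i => out ++ [PySem.List.pyGetD xs (i + 1) ' ', PySem.List.pyGetD xs i ' ']) []
      = swapGo xs := by
  rw [PySem.List.pyRange_of_pos 0 ((xs.length : Int) - 1) (by omega)]
  have hc : (if (0 : Int) < (xs.length : Int) - 1
        then (((xs.length : Int) - 1 - 0 + 2 - 1) / 2).toNat else 0) = xs.length / 2 := by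
    split_ifs with h <;> omega
  rw [hc, List.foldl_map]
  have h1 : ∀ k : Nat, PySem.List.pyGetD xs (0 + 2 * (k : Int) + 1) ' ' = xs.getD (2*k+1) ' ' := by
    intro k
    have : (0 + 2 * (k : Int) + 1) = ((2*k+1 : Nat) : Int) := by push_cast; ring
    rw [this, PySem.List.pyGetD_natCast]
  have h2 : ∀ k : Nat, PySem.List.pyGetD xs (0 + 2 * (k : Int)) ' ' = xs.getD (2*k) ' ' := by
    intro k
    have : (0 + 2 * (k : Int)) = ((2*k : Nat) : Int) := by push_cast; ring
    rw [this, PySem.List.pyGetD_natCast]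
  simp only [h1, h2]
  rw [foldNat_swap]
  simp

-- ===== VERDICT (by name: the statement is the Claim_ definition above) =====
theorem switch0_spec : Claim_equal_switch0 := by
  intro word _
  unfold Spec_switch0 switch0 switch0_alt
  simp only [slice2_evens, slice2_odds, Option.getD_some, zip_fold_swap, List.nil_append,
    pyfold_swap]
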